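-- pv_equiv track=rewrite | github.com/Snapzie/AdventOfCode | 2024/Day21/p2.py | calc_seq
-- ===== SOURCE A (Python) =====
-- from collections import defaultdict
--
-- dir_pad = {
--     '^': (1,0),
--     'A': (2,0),
--     '<': (0,1),
--     'v': (1,1),
--     '>': (2,1)
-- }
--
-- def calc_seq(new_seq):
--     for _ in range(25):
--         seq = new_seq.copy()
--         new_seq = defaultdict(int)
--         px,py = dir_pad['A']
--         for group,n in seq.items():
--             for inst in group:
--                 ix,iy = dir_pad[inst]
--                 num_x = ix-px
--                 num_y = iy-py
--                 x_seq = []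
--                 y_seq = []
--                 for _ in range(abs(num_y)):
--                     if num_y < 0:
--                         y_seq.append('^')
--                     else:
--                         y_seq.append('v')
--                 for _ in range(abs(num_x)):
--                     if num_x < 0:
--                         x_seq.append('<')
--                     else:
--                         x_seq.append('>')
--                 if iy == 0 and px == 0:
--                     new_seq[''.join(x_seq + y_seq + ['A'])] += n
--                 elif ix == 0 and py == 0:
--                     new_seq[''.join(y_seq + x_seq + ['A'])] += n
--                 elif num_x < 0:
--                     new_seq[''.join(x_seq + y_seq + ['A'])] += n
--                 elif num_y != 0:
--                     new_seq[''.join(y_seq + x_seq + ['A'])] += n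
--                 else:
--                     new_seq[''.join(x_seq + y_seq + ['A'])] += n
--                 px = ix
--                 py = iy
--     return new_seq
-- ===== SOURCE B (Python) =====
-- from collections import defaultdict
--
-- # Precomputed transition table: for each ordered pair (prev, inst) of directional-pad
-- # keys, the expanded move group (shortest safe path on the pad, ending in 'A').
-- T = {
--     ('^', '^'): 'A',   ('^', 'A'): '>A',   ('^', '<'): 'v<A',  ('^', 'v'): 'vA',  ('^', '>'): 'v>A',
--     ('A', '^'): '<A',  ('A', 'A'): 'A',    ('A', '<'): 'v<<A', ('A', 'v'): '<vA', ('A', '>'): 'vA',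
--     ('<', '^'): '>^A', ('<', 'A'): '>>^A', ('<', '<'): 'A',    ('<', 'v'): '>A',  ('<', '>'): '>>A',
--     ('v', '^'): '^A',  ('v', 'A'): '^>A',  ('v', '<'): '<A',   ('v', 'v'): 'A',   ('v', '>'): '>A',
--     ('>', '^'): '<^A', ('>', 'A'): '^A',   ('>', '<'): '<<A',  ('>', 'v'): '<A',  ('>', '>'): 'A',
-- }
--
-- def calc_seq(new_seq):
--     for _ in range(25):
--         out = defaultdict(int)
--         prev = 'A'  # position state is threaded across groups, as on the real pad
--         for group, n in new_seq.items():
--             for inst in group: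
--                 out[T[(prev, inst)]] += n
--                 prev = inst
--         new_seq = out
--     return new_seq
-- ===== Notes on version B (the rewrite author's own statement) =====
-- stated objective: simpler
-- what changed: B replaces A's per-character geometric computation (pad coordinates, deltas, building x/y move lists and a 5-way gap-avoidance branch on every character of every round) by a precomputed 25-entry transition table keyed on (previous key, next key), threading the previous key across groups exactly as A threads its pad position; each round is then a single table-lookup-and-count pass.
import Mathlib
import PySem

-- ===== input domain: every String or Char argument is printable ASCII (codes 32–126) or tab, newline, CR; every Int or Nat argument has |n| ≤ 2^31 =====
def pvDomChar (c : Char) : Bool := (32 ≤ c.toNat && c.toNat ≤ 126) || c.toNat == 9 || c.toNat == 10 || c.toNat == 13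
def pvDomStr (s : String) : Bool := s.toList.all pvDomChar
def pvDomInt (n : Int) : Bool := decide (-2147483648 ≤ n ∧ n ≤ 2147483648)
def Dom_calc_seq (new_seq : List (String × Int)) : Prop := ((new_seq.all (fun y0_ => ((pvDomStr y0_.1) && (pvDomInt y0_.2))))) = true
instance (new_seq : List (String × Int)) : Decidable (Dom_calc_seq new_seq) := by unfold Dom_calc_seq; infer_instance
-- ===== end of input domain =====

-- B replaces A's per-character delta/gap-avoidance geometry by a precomputed 25-entry
-- transition table keyed on (previous key, next key); objective: simpler.

-- ===== PORT A =====

-- dir_pad[c]: exact on the pad's five keys; on any other char Python raises KeyError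
-- (such inputs are excluded by Pre_calc_seq).
def dirPad : Char → Int × Int
  | '^' => (1, 0)
  | 'A' => (2, 0)
  | '<' => (0, 1)
  | 'v' => (1, 1)
  | '>' => (2, 1)
  | _   => (0, 0)

-- the body of A's inner `for inst in group` loop; state = (new_seq, px, py)
def stepA_char (st : PySem.Dict String Int × Int × Int) (n : Int) (inst : Char) :
    PySem.Dict String Int × Int × Int :=
  let nd := st.1
  let px := st.2.1
  let py := st.2.2
  let ix := (dirPad inst).1
  let iy := (dirPad inst).2
  let num_x := ix - px
  let num_y := iy - py
  let y_seq : List Char :=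
    (PySem.List.pyRange 0 (Int.natAbs num_y) 1).foldl
      (fun acc _ => acc ++ [if num_y < 0 then '^' else 'v']) []
  let x_seq : List Char :=
    (PySem.List.pyRange 0 (Int.natAbs num_x) 1).foldl
      (fun acc _ => acc ++ [if num_x < 0 then '<' else '>']) []
  let key : String :=
    if iy = 0 ∧ px = 0 then String.ofList (x_seq ++ y_seq ++ ['A'])
    else if ix = 0 ∧ py = 0 then String.ofList (y_seq ++ x_seq ++ ['A'])
    else if num_x < 0 then String.ofList (x_seq ++ y_seq ++ ['A'])
    else if num_y ≠ 0 then String.ofList (y_seq ++ x_seq ++ ['A'])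
    else String.ofList (x_seq ++ y_seq ++ ['A'])
  (nd.insert key (nd.getD key 0 + n), ix, iy)

-- one pass of A's `for _ in range(25)` body
def stepA (d : PySem.Dict String Int) : PySem.Dict String Int :=
  (d.items.foldl
    (fun st gi => gi.1.toList.foldl (fun st c => stepA_char st gi.2 c) st)
    (PySem.Dict.empty, (dirPad 'A').1, (dirPad 'A').2)).1

def calc_seq (new_seq : List (String × Int)) : List (String × Int) :=
  ((PySem.List.pyRange 0 25 1).foldl (fun d _ => stepA d)
    (PySem.Dict.ofList new_seq)).items

-- ===== PORT B =====

-- T[(p, c)]: the precomputed table; on a char outside the pad Python B raises KeyError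
-- (excluded by Pre_calc_seq).
def tbl : Char → Char → String
  | '^', '^' => "A"   | '^', 'A' => ">A"   | '^', '<' => "v<A"  | '^', 'v' => "vA"  | '^', '>' => "v>A"
  | 'A', '^' => "<A"  | 'A', 'A' => "A"    | 'A', '<' => "v<<A" | 'A', 'v' => "<vA" | 'A', '>' => "vA"
  | '<', '^' => ">^A" | '<', 'A' => ">>^A" | '<', '<' => "A"    | '<', 'v' => ">A"  | '<', '>' => ">>A"
  | 'v', '^' => "^A"  | 'v', 'A' => "^>A"  | 'v', '<' => "<A"   | 'v', 'v' => "A"   | 'v', '>' => ">A"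
  | '>', '^' => "<^A" | '>', 'A' => "^A"   | '>', '<' => "<<A"  | '>', 'v' => "<A"  | '>', '>' => "A"
  | _, _ => ""

-- one pass of B's loop body; state = (out, prev)
def stepB (d : PySem.Dict String Int) : PySem.Dict String Int :=
  (d.items.foldl
    (fun (st : PySem.Dict String Int × Char) gi =>
      gi.1.toList.foldl
        (fun st c =>
          let k := tbl st.2 c
          (st.1.insert k (st.1.getD k 0 + gi.2), c)) st)
    (PySem.Dict.empty, 'A')).1

def calc_seq_alt (new_seq : List (String × Int)) : List (String × Int) :=
  ((PySem.List.pyRange 0 25 1).foldl (fun d _ => stepB d)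
    (PySem.Dict.ofList new_seq)).items

-- ===== PRECONDITION & SPEC =====

def padKey (c : Char) : Bool := c = '^' || c = 'A' || c = '<' || c = 'v' || c = '>'

-- Pre_ excludes exactly the inputs on which A raises KeyError: a key string containing
-- a character that is not one of the five directional-pad keys '^' 'A' '<' 'v' '>'.
def Pre_calc_seq (new_seq : List (String × Int)) : Prop :=
  (new_seq.all (fun gi => gi.1.toList.all padKey)) = true

instance (new_seq : List (String × Int)) : Decidable (Pre_calc_seq new_seq) := by
  unfold Pre_calc_seq; infer_instance

def pvWitness_calc_seq : (List (String × Int)) := [("<vA", 3), ("A", 1)]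

def Spec_calc_seq (new_seq : List (String × Int)) (out : List (String × Int)) : Prop := out = calc_seq_alt new_seq
instance (new_seq : List (String × Int)) (out : List (String × Int)) : Decidable (Spec_calc_seq new_seq out) := by unfold Spec_calc_seq; infer_instance

-- ===== CLAIM (what is proved, stated in full; the proofs are below) =====
def Claim_equal_calc_seq : Prop := ∀ (new_seq : List (String × Int)), Dom_calc_seq new_seq → Pre_calc_seq new_seq → Spec_calc_seq new_seq (calc_seq new_seq)

-- ===== LEMMAS AND PROOFS =====

-- a dict all of whose keys are strings over the five pad keys
def goodD (d : PySem.Dict String Int) : Prop :=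
  ∀ s ∈ d.keys, s.toList.all padKey = true

theorem padKey_elim {c : Char} (h : padKey c = true) :
    c = '^' ∨ c = 'A' ∨ c = '<' ∨ c = 'v' ∨ c = '>' := by
  simp [padKey] at h; tauto

-- A's per-character step, started at the pad position of a valid key p, inserts exactly
-- the table entry tbl p c and moves to the pad position of c  (25 cases, by computation)
theorem stepA_char_eq (d : PySem.Dict String Int) (n : Int) {p c : Char}
    (hp : padKey p = true) (hc : padKey c = true) :
    stepA_char (d, (dirPad p).1, (dirPad p).2) n c
      = (d.insert (tbl p c) (d.getD (tbl p c) 0 + n), (dirPad c).1, (dirPad c).2) := by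
  rcases padKey_elim hp with rfl | rfl | rfl | rfl | rfl <;>
    rcases padKey_elim hc with rfl | rfl | rfl | rfl | rfl <;>
      simp [stepA_char, dirPad, tbl, PySem.List.pyRange] <;> rfl

theorem tbl_good {p c : Char} (hp : padKey p = true) (hc : padKey c = true) :
    (tbl p c).toList.all padKey = true := by
  rcases padKey_elim hp with rfl | rfl | rfl | rfl | rfl <;>
    rcases padKey_elim hc with rfl | rfl | rfl | rfl | rfl <;> rfl

theorem goodD_insert {d : PySem.Dict String Int} {k : String} {v : Int}
    (hd : goodD d) (hk : k.toList.all padKey = true) : goodD (d.insert k v) := by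
  intro s hs
  rcases (PySem.Dict.mem_keys_insert _ _ _ _).1 hs with rfl | hs
  · exact hk
  · exact hd s hs

-- coupling of the two inner character loops
theorem inner_fold (cs : List Char) :
    ∀ (d : PySem.Dict String Int) (p : Char) (n : Int),
      (∀ c ∈ cs, padKey c = true) → padKey p = true → goodD d →
      cs.foldl (fun st c => stepA_char st n c) (d, (dirPad p).1, (dirPad p).2)
        = ((cs.foldl (fun st c =>
              let k := tbl st.2 c
              (st.1.insert k (st.1.getD k 0 + n), c)) (d, p)).1,
           (dirPad (cs.foldl (fun st c =>
              let k := tbl st.2 c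
              (st.1.insert k (st.1.getD k 0 + n), c)) (d, p)).2).1,
           (dirPad (cs.foldl (fun st c =>
              let k := tbl st.2 c
              (st.1.insert k (st.1.getD k 0 + n), c)) (d, p)).2).2)
      ∧ padKey (cs.foldl (fun st c =>
              let k := tbl st.2 c
              (st.1.insert k (st.1.getD k 0 + n), c)) (d, p)).2 = true
      ∧ goodD (cs.foldl (fun st c =>
              let k := tbl st.2 c
              (st.1.insert k (st.1.getD k 0 + n), c)) (d, p)).1 := by
  induction cs with
  | nil => intro d p n _ hp hd; exact ⟨rfl, hp, hd⟩
  | cons c cs ih =>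
    intro d p n hcs hp hd
    have hc : padKey c = true := hcs c (List.mem_cons_self ..)
    have hcs' : ∀ c' ∈ cs, padKey c' = true := fun c' h => hcs c' (List.mem_cons_of_mem _ h)
    have hd' : goodD (d.insert (tbl p c) (d.getD (tbl p c) 0 + n)) :=
      goodD_insert hd (tbl_good hp hc)
    have := ih (d.insert (tbl p c) (d.getD (tbl p c) 0 + n)) c n hcs' hc hd'
    simpa [List.foldl_cons, stepA_char_eq d n hp hc] using this

-- coupling of the two loops over the dict's items
theorem outer_fold (l : List (String × Int)) :
    ∀ (d : PySem.Dict String Int) (p : Char),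
      (∀ gi ∈ l, gi.1.toList.all padKey = true) → padKey p = true → goodD d →
      l.foldl (fun st gi => gi.1.toList.foldl (fun st c => stepA_char st gi.2 c) st)
          (d, (dirPad p).1, (dirPad p).2)
        = ((l.foldl (fun (st : PySem.Dict String Int × Char) gi =>
              gi.1.toList.foldl (fun st c =>
                let k := tbl st.2 c
                (st.1.insert k (st.1.getD k 0 + gi.2), c)) st) (d, p)).1,
           (dirPad (l.foldl (fun (st : PySem.Dict String Int × Char) gi =>
              gi.1.toList.foldl (fun st c =>
                let k := tbl st.2 c
                (st.1.insert k (st.1.getD k 0 + gi.2), c)) st) (d, p)).2).1,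
           (dirPad (l.foldl (fun (st : PySem.Dict String Int × Char) gi =>
              gi.1.toList.foldl (fun st c =>
                let k := tbl st.2 c
                (st.1.insert k (st.1.getD k 0 + gi.2), c)) st) (d, p)).2).2)
      ∧ padKey (l.foldl (fun (st : PySem.Dict String Int × Char) gi =>
              gi.1.toList.foldl (fun st c =>
                let k := tbl st.2 c
                (st.1.insert k (st.1.getD k 0 + gi.2), c)) st) (d, p)).2 = true
      ∧ goodD (l.foldl (fun (st : PySem.Dict String Int × Char) gi =>
              gi.1.toList.foldl (fun st c =>
                let k := tbl st.2 c
                (st.1.insert k (st.1.getD k 0 + gi.2), c)) st) (d, p)).1 := by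
  induction l with
  | nil => intro d p _ hp hd; exact ⟨rfl, hp, hd⟩
  | cons gi l ih =>
    intro d p hl hp hd
    have hgi : ∀ c ∈ gi.1.toList, padKey c = true :=
      List.all_eq_true.1 (hl gi (List.mem_cons_self ..))
    have hl' : ∀ g ∈ l, g.1.toList.all padKey = true := fun g h => hl g (List.mem_cons_of_mem _ h)
    obtain ⟨heq, hp', hd'⟩ := inner_fold gi.1.toList d p gi.2 hgi hp hd
    have := ih _ _ hl' hp' hd'
    simpa [List.foldl_cons, heq] using this

-- one full round: on a good dict the two round bodies agree, and goodness is preserved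
theorem step_eq {d : PySem.Dict String Int} (hd : goodD d) :
    stepA d = stepB d ∧ goodD (stepB d) := by
  have hl : ∀ gi ∈ d.items, gi.1.toList.all padKey = true := by
    intro gi hgi
    exact hd gi.1 (PySem.Dict.mem_keys_of_mem_items _ hgi)
  have hempty : goodD (PySem.Dict.empty : PySem.Dict String Int) := by
    intro s hs; simp [PySem.Dict.keys_empty] at hs
  obtain ⟨heq, _, hgood⟩ := outer_fold d.items PySem.Dict.empty 'A' hl rfl hempty
  refine ⟨?_, hgood⟩
  unfold stepA stepB
  rw [heq]

theorem rounds_eq (rs : List Int) :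
    ∀ (d : PySem.Dict String Int), goodD d →
      rs.foldl (fun d _ => stepA d) d = rs.foldl (fun d _ => stepB d) d := by
  induction rs with
  | nil => intro d _; rfl
  | cons r rs ih =>
    intro d hd
    obtain ⟨heq, hgood⟩ := step_eq hd
    simp only [List.foldl_cons, heq]
    exact ih _ hgood

theorem goodD_ofList {ns : List (String × Int)} (h : Pre_calc_seq ns) :
    goodD (PySem.Dict.ofList ns) := by
  intro s hs
  have hk : (PySem.Dict.ofList ns).keys = PySem.Set.ofList (ns.map (·.1)) := by
    rw [show (PySem.Dict.ofList ns)
          = ns.foldl (fun d (p : String × Int) => d.insert p.1 p.2) PySem.Dict.empty from rfl,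
        PySem.Dict.keys_foldl_insert_key ns (·.1) (fun _ p => p.2) PySem.Dict.empty]
    rw [PySem.Dict.keys_empty, PySem.Set.update_nil_left]
  rw [hk] at hs
  have hs' : s ∈ ns.map (·.1) := (PySem.Set.mem_ofList _ _).1 hs
  obtain ⟨gi, hgi, rfl⟩ := List.mem_map.1 hs'
  simpa using List.all_eq_true.1 h gi hgi

-- ===== VERDICT (by name: the statement is the Claim_ definition above) =====
theorem calc_seq_spec : Claim_equal_calc_seq := by
  intro ns _ hpre
  unfold Spec_calc_seq calc_seq calc_seq_alt
  rw [rounds_eq _ _ (goodD_ofList hpre)]
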